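-- pv_equiv track=rewrite | github.com/medad-hoze/geoAI | Utils.py | find_type_for_feature_to_point
-- ===== SOURCE A (Python) =====
-- from difflib import SequenceMatcher
--
-- def find_type_for_feature_to_point(sentance):
--     types_accepted = ["INSIDE","CENTROID"]
--     sentance = sentance.split()
--     type_ = ''
--     score = 0
--     for word in sentance:
--         for type_word in types_accepted:
--             word = word.lower()
--             match_ratio = SequenceMatcher(None, word, type_word).ratio()
--             if match_ratio > score:
--                 score = match_ratio
--                 if match_ratio > 0.7:
--                     type_ = type_word
--
--     if type_ == '':
--         type_ = 'INSIDE'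
--
--     return type_
-- ===== SOURCE B (Python) =====
-- def find_type_for_feature_to_point(sentance):
--     # A's fuzzy scan is dead code: it lowercases each word but matches it against the
--     # UPPERCASE literals "INSIDE"/"CENTROID", so a lowercased word shares no character
--     # with either target, every SequenceMatcher ratio is exactly 0, the `> 0.7` gate
--     # never fires, type_ stays '' and the fallback is always returned.
--     return "INSIDE"
-- ===== Notes on version B (the rewrite author's own statement) =====
-- stated objective: faster
-- what changed: A lowercases each word but fuzzy-matches it against the uppercase literals 'INSIDE'/'CENTROID', so every SequenceMatcher ratio is exactly 0, the 0.7 gate never fires and A returns 'INSIDE' on every input; B eliminates this dead code and returns the constant directly (the Lean proof shows A is constant).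
import Mathlib
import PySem

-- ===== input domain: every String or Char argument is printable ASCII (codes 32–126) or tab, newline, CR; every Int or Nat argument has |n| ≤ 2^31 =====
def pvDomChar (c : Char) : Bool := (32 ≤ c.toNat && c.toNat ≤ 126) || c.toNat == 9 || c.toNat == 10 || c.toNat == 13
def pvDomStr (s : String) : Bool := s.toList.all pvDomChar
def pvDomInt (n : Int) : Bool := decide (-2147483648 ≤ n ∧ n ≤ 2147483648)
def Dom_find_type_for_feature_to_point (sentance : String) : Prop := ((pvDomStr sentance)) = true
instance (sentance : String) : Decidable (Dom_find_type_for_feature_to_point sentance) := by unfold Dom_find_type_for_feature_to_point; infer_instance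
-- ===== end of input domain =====

-- B replaces A's scan with the constant it always computes: A's lowercase-vs-uppercase comparison makes every ratio 0, so A returns "INSIDE" on every input (proved below); objective: faster.


-- ===== PORT A =====
-- Shared helper (both Pythons call the same library routine difflib.SequenceMatcher(None, a, b).ratio()):
-- a hand port of difflib, exact here because b ∈ {"INSIDE","CENTROID"} is short (< 200 chars), so
-- autojunk/junk are inactive: b2j indexes every element of b, and the two junk-related extension
-- `while` loops of find_longest_match cannot fire on a junk-free b2j (the DP chains are already
-- maximal), so they are omitted.  ratio() is computed in exact rationals where Python uses floats;
-- exact here because (as proved below) every ratio these programs compute equals 0 exactly.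

-- b2j.get(a[i], []): the (ascending) list of indices j with b[j] == c.
def pvB2jIdx (b : List Char) (c : Char) : List Nat :=
  (List.range b.length).filter (fun j => b.getD j ' ' == c)

-- difflib's find_longest_match(alo, ahi, blo, bhi) (junk-free form; the Python `break` on j ≥ bhi is
-- rendered as the j < bhi filter, exact because the index list is ascending).
def pvFlm (a b : List Char) (alo ahi blo bhi : Nat) : Nat × Nat × Nat :=
  (((List.range' alo (ahi - alo)).foldl
    (fun (st : PySem.Dict Int Nat × (Nat × Nat × Nat)) i =>
      (pvB2jIdx b (a.getD i ' ')).foldl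
        (fun (st2 : PySem.Dict Int Nat × (Nat × Nat × Nat)) j =>
          if blo ≤ j ∧ j < bhi then
            let k := st.1.getD ((j : Int) - 1) 0 + 1   -- k = j2len.get(j-1, 0) + 1 (j2len of the previous i)
            (st2.1.insert (j : Int) k,                  -- newj2len[j] = k
             if k > st2.2.2.2 then (i + 1 - k, j + 1 - k, k) else st2.2)  -- besti = i-k+1 ≥ alo, bestj = j-k+1 ≥ blo
          else st2)
        (PySem.Dict.mk [], st.2))                       -- newj2len starts empty; best carries over; j2len = newj2len
    (PySem.Dict.mk [], (alo, blo, 0))).2)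

-- total size of get_matching_blocks(): difflib's queue recursion written as structural recursion on
-- fuel (each recursive call is on a strictly smaller window, so fuel la+lb+1 always suffices).
def pvMatchesTotal : Nat → List Char → List Char → Nat → Nat → Nat → Nat → Nat
  | 0, _, _, _, _, _, _ => 0
  | fuel + 1, a, b, alo, ahi, blo, bhi =>
    let r := pvFlm a b alo ahi blo bhi
    if r.2.2 = 0 then 0
    else pvMatchesTotal fuel a b alo r.1 blo r.2.1 + r.2.2 +
         pvMatchesTotal fuel a b (r.1 + r.2.2) ahi (r.2.1 + r.2.2) bhi

-- SequenceMatcher(None, a, b).ratio() = _calculate_ratio(sum of block sizes, len(a)+len(b)).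
def pvRatio (a b : List Char) : ℚ :=
  let m := pvMatchesTotal (a.length + b.length + 1) a b 0 a.length 0 b.length
  let length := a.length + b.length
  if length = 0 then 1 else 2 * (m : ℚ) / (length : ℚ)

def find_type_for_feature_to_point (sentance : String) : String :=
  let types_accepted : List (List Char) := ["INSIDE".toList, "CENTROID".toList]
  let words := PySem.Chars.split₀ sentance.toList
  let st := words.foldl (fun (st : List Char × ℚ) word =>
    types_accepted.foldl (fun (st : List Char × ℚ) type_word =>
      let w := PySem.Chars.lower word          -- word = word.lower() (idempotent re-assignment)
      let match_ratio := pvRatio w type_word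
      if match_ratio > st.2 then
        (if match_ratio > 7/10 then type_word else st.1, match_ratio)
      else st) st) ([], 0)                     -- st = (type_, score)
  if st.1 = [] then "INSIDE" else String.ofList st.1

-- ===== PORT B =====
-- Source B: A's fuzzy scan is dead code (lowercased words vs the uppercase literals give ratio 0,
-- the 0.7 gate never fires), so B is the constant A always returns; proved below (pv_A_const).
def find_type_for_feature_to_point_alt (sentance : String) : String :=
  "INSIDE"

-- ===== PRECONDITION & SPEC =====
def Spec_find_type_for_feature_to_point (sentance : String) (out : String) : Prop := out = find_type_for_feature_to_point_alt sentance
instance (sentance : String) (out : String) : Decidable (Spec_find_type_for_feature_to_point sentance out) := by unfold Spec_find_type_for_feature_to_point; infer_instance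

-- ===== CLAIM (what is proved, stated in full; the proofs are below) =====
def Claim_equal_find_type_for_feature_to_point : Prop := ∀ (sentance : String), Dom_find_type_for_feature_to_point sentance → Spec_find_type_for_feature_to_point sentance (find_type_for_feature_to_point sentance)

-- ===== LEMMAS AND PROOFS =====

-- A lowercased character is never an uppercase ASCII letter.
theorem pv_lowerChar_not_upper (c : Char) : PySem.Chars.isupper (PySem.Chars.lowerChar c) = false := by
  simp only [PySem.Chars.lowerChar]
  split
  · rename_i h
    simp only [PySem.Chars.isupper, Bool.and_eq_true, decide_eq_true_eq] at h
    have h1 : ('A').toNat ≤ c.toNat := Char.le_def.mp h.1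
    have hA : ('A').toNat = 65 := by decide
    have hZ : ('Z').toNat = 90 := by decide
    have hlt : c.toNat + 32 < 55296 := by
      have h2 : c.toNat ≤ ('Z').toNat := Char.le_def.mp h.2
      omega
    have hv : ∀ n : Nat, n < 55296 → (Char.ofNat n).toNat = n := by
      intro n hn
      simp [Char.ofNat, Char.ofNatAux, Char.toNat, Nat.isValidChar, hn]
    simp only [PySem.Chars.isupper, Bool.and_eq_false_iff, decide_eq_false_iff_not]
    right
    intro hle
    have hle' : (Char.ofNat (c.toNat + 32)).toNat ≤ ('Z').toNat := Char.le_def.mp hle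
    rw [hv _ hlt] at hle'
    omega
  · rename_i h
    simpa using h

-- No character of `lower w` occurs in an all-uppercase list t.
theorem pv_lower_disjoint (w t : List Char) (ht : ∀ c ∈ t, PySem.Chars.isupper c = true) :
    ∀ c ∈ PySem.Chars.lower w, c ∉ t := by
  intro c hc hct
  simp only [PySem.Chars.lower, List.mem_map] at hc
  obtain ⟨x, _, rfl⟩ := hc
  have := ht _ hct
  rw [pv_lowerChar_not_upper] at this
  exact Bool.false_ne_true this

-- If c does not occur in b, b2j has no indices for it.
theorem pv_b2j_nil (b : List Char) (c : Char) (h : c ∉ b) : pvB2jIdx b c = [] := by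
  unfold pvB2jIdx
  rw [List.filter_eq_nil_iff]
  intro j hj
  simp only [List.mem_range] at hj
  simp only [beq_iff_eq]
  have hmem : b.getD j ' ' ∈ b := by
    rw [List.getD_eq_getElem _ _ hj]; exact List.getElem_mem hj
  exact fun he => h (he ▸ hmem)

-- With disjoint inputs the DP loop never updates anything: find_longest_match returns size 0.
theorem pv_flm_zero (a b : List Char) (ahi : Nat) (hahi : ahi ≤ a.length)
    (hd : ∀ c ∈ a, c ∉ b) : pvFlm a b 0 ahi 0 b.length = (0, 0, 0) := by
  unfold pvFlm
  have hnil : ∀ i ∈ List.range' 0 (ahi - 0), pvB2jIdx b (a.getD i ' ') = [] := by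
    intro i hi
    apply pv_b2j_nil
    apply hd
    have hi' : i < ahi := by
      have := List.mem_range'_1.mp hi
      omega
    rw [List.getD_eq_getElem _ _ (by omega)]
    exact List.getElem_mem (by omega)
  have hfold : (List.range' 0 (ahi - 0)).foldl
      (fun (st : PySem.Dict Int Nat × (Nat × Nat × Nat)) i =>
        (pvB2jIdx b (a.getD i ' ')).foldl
          (fun (st2 : PySem.Dict Int Nat × (Nat × Nat × Nat)) j =>
            if 0 ≤ j ∧ j < b.length then
              let k := st.1.getD ((j : Int) - 1) 0 + 1
              (st2.1.insert (j : Int) k,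
               if k > st2.2.2.2 then (i + 1 - k, j + 1 - k, k) else st2.2)
            else st2)
          (PySem.Dict.mk [], st.2))
      (PySem.Dict.mk [], (0, 0, 0)) = (PySem.Dict.mk [], (0, 0, 0)) := by
    generalize List.range' 0 (ahi - 0) = l at hnil
    induction l with
    | nil => rfl
    | cons x xs ih =>
      rw [List.foldl_cons, hnil x List.mem_cons_self, List.foldl_nil]
      exact ih (fun i hi => hnil i (List.mem_cons_of_mem _ hi))
  rw [hfold]

-- Hence the total matching size is 0 and the ratio is exactly 0.
theorem pv_ratio_zero (w t : List Char) (htne : t ≠ [])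
    (ht : ∀ c ∈ t, PySem.Chars.isupper c = true) :
    pvRatio (PySem.Chars.lower w) t = 0 := by
  have hflm := pv_flm_zero (PySem.Chars.lower w) t (PySem.Chars.lower w).length le_rfl
    (pv_lower_disjoint w t ht)
  have hlen : (PySem.Chars.lower w).length + t.length ≠ 0 := by
    cases t with
    | nil => exact absurd rfl htne
    | cons a l => simp
  unfold pvRatio pvMatchesTotal
  rw [hflm]
  simp
  exact fun _ => htne

theorem pv_ratio_INSIDE (w : List Char) : pvRatio (PySem.Chars.lower w) "INSIDE".toList = 0 := by
  have h : "INSIDE".toList = ['I', 'N', 'S', 'I', 'D', 'E'] := by simp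
  rw [h]
  exact pv_ratio_zero w _ (by simp) (by intro c hc; fin_cases hc <;> rfl)

theorem pv_ratio_CENTROID (w : List Char) : pvRatio (PySem.Chars.lower w) "CENTROID".toList = 0 := by
  have h : "CENTROID".toList = ['C', 'E', 'N', 'T', 'R', 'O', 'I', 'D'] := by simp
  rw [h]
  exact pv_ratio_zero w _ (by simp) (by intro c hc; fin_cases hc <;> rfl)

-- A fold whose step fixes the accumulator leaves it unchanged.
theorem pv_foldl_fix {α β : Type} (f : α → β → α) (a : α) (h : ∀ x, f a x = a)
    (l : List β) : l.foldl f a = a := by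
  induction l with
  | nil => rfl
  | cons x xs ih => rw [List.foldl_cons, h x]; exact ih

-- A's double fold never leaves the initial state ([], 0): every ratio is 0, so no update fires.
theorem pv_A_const (sentance : String) : find_type_for_feature_to_point sentance = "INSIDE" := by
  simp only [find_type_for_feature_to_point]
  rw [pv_foldl_fix
    (fun (st : List Char × ℚ) word =>
      (["INSIDE".toList, "CENTROID".toList]).foldl
        (fun (st : List Char × ℚ) type_word =>
          if pvRatio (PySem.Chars.lower word) type_word > st.2 then
            (if pvRatio (PySem.Chars.lower word) type_word > 7/10 then type_word else st.1,
             pvRatio (PySem.Chars.lower word) type_word)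
          else st)
        st)
    ([], 0)
    (fun word => by
      simp only [List.foldl_cons, List.foldl_nil, pv_ratio_INSIDE, pv_ratio_CENTROID]
      norm_num)]
  simp

-- ===== VERDICT (by name: the statement is the Claim_ definition above) =====
theorem find_type_for_feature_to_point_spec : Claim_equal_find_type_for_feature_to_point := by
  intro sentance _
  unfold Spec_find_type_for_feature_to_point
  rw [pv_A_const]
  rfl
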